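-- pv_equiv track=rewrite | github.com/LeiShi1313/readrepeat | worker/segment.py | _force_merge_to_count
-- ===== SOURCE A (Python) =====
-- from typing import List, Tuple
--
-- def _force_merge_to_count(sentences: List[str], target: int) -> List[str]:
--     """Force merge sentences until we have exactly target count.
--
--     Merges shortest sentences first to minimize information loss.
--
--     Args:
--         sentences: List of sentences to merge
--         target: Target number of sentences
--
--     Returns:
--         List of exactly target sentences (or fewer if input was smaller)
--     """
--     if len(sentences) <= target:
--         return sentences
--
--     # Make a copy to avoid mutating the input
--     sentences = sentences.copy()
--
--     # Merge shortest sentences first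
--     while len(sentences) > target:
--         # Find shortest sentence (not last, so we can merge forward)
--         min_len = float('inf')
--         min_idx = 0
--         for i, s in enumerate(sentences[:-1]):
--             if len(s) < min_len:
--                 min_len = len(s)
--                 min_idx = i
--
--         # Merge with next
--         sentences[min_idx] = sentences[min_idx] + " " + sentences[min_idx + 1]
--         sentences.pop(min_idx + 1)
--
--     return sentences
-- ===== SOURCE B (Python) =====
-- def _pv_combine(a, b):
--     if a is None:
--         return b
--     if b is None:
--         return a
--     return b if b[0] < a[0] else a
--
--
-- def _pv_build(lo, hi, vals):
--     if hi <= lo + 1: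
--         return [vals[lo]]
--     m = (lo + hi) // 2
--     l = _pv_build(lo, m, vals)
--     r = _pv_build(m, hi, vals)
--     return [_pv_combine(l[0], r[0]), l, r]
--
--
-- def _pv_update(t, lo, hi, p, v):
--     if hi <= lo + 1:
--         return [v]
--     m = (lo + hi) // 2
--     if p < m:
--         l = _pv_update(t[1], lo, m, p, v)
--         r = t[2]
--     else:
--         l = t[1]
--         r = _pv_update(t[2], m, hi, p, v)
--     return [_pv_combine(l[0], r[0]), l, r]
--
--
-- def _force_merge_to_count(sentences, target):
--     n = len(sentences)
--     if n <= target: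
--         return sentences
--
--     # Segment tree over original positions, holding (length, pos) for every
--     # live block except the current tail (the tail is never merged forward);
--     # the root is the leftmost shortest mergeable block.  A linked list of
--     # successors tracks the live blocks.
--     texts = {}
--     nxt = {}
--     vals = []
--     for p, s in enumerate(sentences):
--         texts[p] = s
--         if p < n - 1:
--             nxt[p] = p + 1
--             vals.append((len(s), p))
--         else:
--             vals.append(None)
--     tree = _pv_build(0, n, vals)
--     tail = n - 1
--     count = n
--
--     while count > target:
--         best = tree[0]
--         i = best[1]
--         j = nxt[i]
--         texts[i] = texts[i] + " " + texts[j]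
--         if j == tail:
--             tail = i
--             tree = _pv_update(tree, 0, n, i, None)
--         else:
--             nxt[i] = nxt[j]
--             tree = _pv_update(tree, 0, n, i, (len(texts[i]), i))
--             tree = _pv_update(tree, 0, n, j, None)
--         count -= 1
--
--     out = []
--     p = 0
--     while True:
--         out.append(texts[p])
--         if p == tail:
--             break
--         p = nxt[p]
--     return out
-- ===== Notes on version B (the rewrite author's own statement) =====
-- stated objective: faster
-- what changed: Replaces A's repeated O(n) rescans for the shortest sentence by a segment tree over original positions (leftmost-min at the root, point updates) combined with a successor linked list, so each merge costs O(log n) instead of O(n); the tail block is kept out of the tree so the root is always the mergeable minimum.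
import Mathlib
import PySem

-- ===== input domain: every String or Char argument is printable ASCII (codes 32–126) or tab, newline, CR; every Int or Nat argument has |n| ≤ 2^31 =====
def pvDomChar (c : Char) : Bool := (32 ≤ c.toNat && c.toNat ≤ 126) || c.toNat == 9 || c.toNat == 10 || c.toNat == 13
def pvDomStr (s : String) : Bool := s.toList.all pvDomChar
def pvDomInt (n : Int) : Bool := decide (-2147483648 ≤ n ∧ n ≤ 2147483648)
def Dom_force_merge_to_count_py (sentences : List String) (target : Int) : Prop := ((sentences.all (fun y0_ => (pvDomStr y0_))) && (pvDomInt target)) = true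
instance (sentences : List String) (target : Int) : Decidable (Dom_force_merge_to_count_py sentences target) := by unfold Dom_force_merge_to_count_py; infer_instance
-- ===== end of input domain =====

-- B replaces A's repeated O(n) rescans for the shortest sentence by a segment tree over the
-- original positions (leftmost minimum at the root, point updates) plus a successor linked
-- list; each merge costs O(log n) instead of O(n) (objective: faster).

-- ===== PORT A =====
-- scan state (min_len, min_idx): min_len = float('inf') is modelled as `none` (inf compares above every length)
def pvAScanStep (st : Option Int × Int) (p : Int × String) : Option Int × Int :=
  match st.1 with
  | none => (some (PySem.Str.len p.2), p.1)
  | some m => if PySem.Str.len p.2 < m then (some (PySem.Str.len p.2), p.1) else st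

-- one iteration of A's while body; none = the Python raises IndexError (outside Pre_)
def pvAStep (s : List String) : Option (List String) :=
  let sc := (PySem.List.enumerate (PySem.List.slice s none (some (-1))) 0).foldl pvAScanStep (none, 0)
  let i := sc.2
  match PySem.List.pyGet? s i, PySem.List.pyGet? s (i + 1) with
  | some a, some b =>
      -- sentences[min_idx] = sentences[min_idx] + " " + sentences[min_idx + 1]; min_idx ≥ 0 always
      let s1 := s.set i.toNat (a ++ " " ++ b)
      (PySem.List.pop? s1 (i + 1)).map (·.2)
  | _, _ => none

-- the while loop; fuel = initial length bounds the iteration count (each pop shortens the list)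
def pvALoop : Nat → List String → Int → List String
  | 0, s, _ => s
  | fuel+1, s, target =>
    if target < PySem.List.len s then
      match pvAStep s with
      | some s' => pvALoop fuel s' target
      | none => s
    else s

def force_merge_to_count_py (sentences : List String) (target : Int) : List String :=
  if PySem.List.len sentences ≤ target then sentences
  else pvALoop sentences.length sentences target

-- ===== PORT B =====
-- b if b[0] < a[0] else a, with None = no candidate
def pvCombine (a b : Option (Int × Int)) : Option (Int × Int) :=
  match a, b with
  | none, b => b
  | some x, none => some x
  | some x, some y => if y.1 < x.1 then some y else some x

-- the nested-list segment tree of Source B: [v] is a leaf, [v, l, r] an inner node (v cached min)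
inductive PVTree where
  | leaf : Option (Int × Int) → PVTree
  | node : Option (Int × Int) → PVTree → PVTree → PVTree
deriving Repr, DecidableEq

def PVTree.root : PVTree → Option (Int × Int)
  | .leaf v => v
  | .node v _ _ => v

-- _pv_build(lo, hi, vals)
def pvBuild (lo hi : Int) (vals : List (Option (Int × Int))) : PVTree :=
  if _h : hi ≤ lo + 1 then .leaf (PySem.List.pyGetD vals lo none)
  else
    let l := pvBuild lo (PySem.Int.floordiv (lo + hi) 2) vals
    let r := pvBuild (PySem.Int.floordiv (lo + hi) 2) hi vals
    .node (pvCombine l.root r.root) l r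
termination_by (hi - lo).toNat
decreasing_by
  · rw [PySem.Int.floordiv_eq_ediv_of_pos (by omega : (0:Int) < 2)]; omega
  · rw [PySem.Int.floordiv_eq_ediv_of_pos (by omega : (0:Int) < 2)]; omega

-- _pv_update(t, lo, hi, p, v); the leaf/node mismatch case is unreachable (Python IndexError)
def pvUpdate : PVTree → Int → Int → Int → Option (Int × Int) → PVTree
  | t, lo, hi, p, v =>
    if hi ≤ lo + 1 then .leaf v
    else
      match t with
      | .leaf w => .leaf w
      | .node _ l r =>
        if p < PySem.Int.floordiv (lo + hi) 2 then
          let l' := pvUpdate l lo (PySem.Int.floordiv (lo + hi) 2) p v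
          .node (pvCombine l'.root r.root) l' r
        else
          let r' := pvUpdate r (PySem.Int.floordiv (lo + hi) 2) hi p v
          .node (pvCombine l.root r'.root) l r'

-- the building loop over enumerate(sentences): texts, nxt, vals
def pvBInit (n : Int) (sentences : List String) :
    PySem.Dict Int String × PySem.Dict Int Int × List (Option (Int × Int)) :=
  (PySem.List.enumerate sentences 0).foldl
    (fun st pr =>
      (st.1.insert pr.1 pr.2,
       if pr.1 < n - 1 then st.2.1.insert pr.1 (pr.1 + 1) else st.2.1,
       st.2.2 ++ [if pr.1 < n - 1 then some (PySem.Str.len pr.2, pr.1) else none]))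
    (PySem.Dict.empty, PySem.Dict.empty, [])

-- one iteration of Source B's merge loop; the `none` fallthroughs are where the Python raises
-- (TypeError / KeyError), both unreachable under Pre_
def pvBIter (n : Int)
    (st : PySem.Dict Int String × PySem.Dict Int Int × Int × PVTree × Int) :
    PySem.Dict Int String × PySem.Dict Int Int × Int × PVTree × Int :=
  let (texts, nxt, tail, tree, count) := st
  match tree.root with
  | none => (texts, nxt, tail, tree, count)
  | some best =>
    let i := best.2
    match nxt.get? i with
    | none => (texts, nxt, tail, tree, count)
    | some j =>
      let texts' := texts.insert i (texts.getD i "" ++ " " ++ texts.getD j "")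
      if j = tail then
        (texts', nxt, i, pvUpdate tree 0 n i none, count - 1)
      else
        (texts', nxt.insert i (nxt.getD j 0), tail,
         pvUpdate (pvUpdate tree 0 n i (some (PySem.Str.len (texts'.getD i ""), i))) 0 n j none,
         count - 1)

-- while count > target
def pvBLoop (target n : Int) :
    Nat → (PySem.Dict Int String × PySem.Dict Int Int × Int × PVTree × Int) →
    PySem.Dict Int String × PySem.Dict Int Int × Int × PVTree × Int
  | 0, st => st
  | fuel+1, st => if target < st.2.2.2.2 then pvBLoop target n fuel (pvBIter n st) else st

-- the final collection walk along the linked list (`none` = KeyError, unreachable under Pre_)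
def pvWalk (texts : PySem.Dict Int String) (nxt : PySem.Dict Int Int) (tail : Int) :
    Nat → Int → List String → List String
  | 0, _, out => out
  | fuel+1, p, out =>
    let out' := out ++ [texts.getD p ""]
    if p = tail then out'
    else
      match nxt.get? p with
      | none => out'
      | some q => pvWalk texts nxt tail fuel q out'

def force_merge_to_count_py_alt (sentences : List String) (target : Int) : List String :=
  let n := PySem.List.len sentences
  if n ≤ target then sentences
  else
    let init := pvBInit n sentences
    let st := pvBLoop target n sentences.length
      (init.1, init.2.1, n - 1, pvBuild 0 n init.2.2, n)
    pvWalk st.1 st.2.1 st.2.2.1 sentences.length 0 []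

-- ===== PRECONDITION & SPEC =====
-- Pre_ excludes exactly the inputs on which the Python A raises IndexError (target ≤ 0 while more
-- sentences than target remain: the loop shrinks the list to one sentence and indexes past its end);
-- B raises there as well (TypeError / RecursionError), so those inputs lie outside both programs.
def Pre_force_merge_to_count_py (sentences : List String) (target : Int) : Prop :=
  1 ≤ target ∨ (sentences.length : Int) ≤ target
instance (sentences : List String) (target : Int) : Decidable (Pre_force_merge_to_count_py sentences target) := by unfold Pre_force_merge_to_count_py; infer_instance
def pvWitness_force_merge_to_count_py : List String × Int := (["ab", "c", "def"], 2)

def Spec_force_merge_to_count_py (sentences : List String) (target : Int) (out : List String) : Prop := out = force_merge_to_count_py_alt sentences target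
instance (sentences : List String) (target : Int) (out : List String) : Decidable (Spec_force_merge_to_count_py sentences target out) := by unfold Spec_force_merge_to_count_py; infer_instance

-- ===== CLAIM (what is proved, stated in full; the proofs are below) =====
def Claim_equal_force_merge_to_count_py : Prop := ∀ (sentences : List String) (target : Int), Dom_force_merge_to_count_py sentences target → Pre_force_merge_to_count_py sentences target → Spec_force_merge_to_count_py sentences target (force_merge_to_count_py sentences target)

-- ===== LEMMAS AND PROOFS =====

-- ---------- the common abstract machine: first argmin index, explicit merge ----------

-- the running selection A's scan computes: first index of minimal key, scanning left to right
def pvBSel (key : Int → Int) (i : Int) (idxs : List Int) : Int :=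
  idxs.foldl (fun m x => if key x < key m then x else m) i

-- the index A merges at (first argmin of length over sentences[:-1])
def pvQIdx (s : List String) : Int :=
  pvBSel (fun j => PySem.Str.len (PySem.List.pyGetD s j "")) 0
    (PySem.List.pyRange 1 (PySem.List.len s - 1) 1)

def pvAbsStep (s : List String) : List String :=
  let q := (pvQIdx s).toNat
  s.take q ++ (s.getD q "" ++ " " ++ s.getD (q+1) "") :: s.drop (q+2)

def pvAbsLoop : Nat → List String → Int → List String
  | 0, s, _ => s
  | fuel+1, s, target =>
    if target < PySem.List.len s then pvAbsLoop fuel (pvAbsStep s) target else s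

theorem pvBSel_cons (key : Int → Int) (i j : Int) (idxs : List Int) :
    pvBSel key i (j :: idxs) = pvBSel key (if key j < key i then j else i) idxs := by
  simp [pvBSel]

theorem pvBSel_mem (key : Int → Int) (idxs : List Int) : ∀ (i : Int),
    pvBSel key i idxs = i ∨ pvBSel key i idxs ∈ idxs := by
  induction idxs with
  | nil => intro i; left; rfl
  | cons x rest ih =>
    intro i
    rw [pvBSel_cons]
    rcases ih (if key x < key i then x else i) with h | h
    · by_cases hc : key x < key i
      · right; rw [if_pos hc] at h ⊢; simp [h]
      · left; rw [if_neg hc] at h ⊢; exact h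
    · right; simp [h]

theorem pvQIdx_bounds (s : List String) (h2 : 2 ≤ s.length) :
    0 ≤ pvQIdx s ∧ pvQIdx s < (s.length : Int) - 1 := by
  unfold pvQIdx
  simp only [PySem.List.len_eq]
  rcases pvBSel_mem (fun j => PySem.Str.len (PySem.List.pyGetD s j "")) _ 0 with h | h
  · rw [h]; constructor <;> [omega; skip]
    have : (2 : Int) ≤ (s.length : Int) := by exact_mod_cast h2
    omega
  · rcases PySem.List.mem_pyRange_one.mp h with ⟨ha, hb⟩
    omega

-- ---------- A's step is the abstract step ----------

theorem pvscan_fold (g : Int → String) (idxs : List Int) : ∀ (i : Int),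
    List.foldl pvAScanStep (some (PySem.Str.len (g i)), i) (idxs.map (fun j => (j, g j)))
    = (some (PySem.Str.len (g (pvBSel (fun j => PySem.Str.len (g j)) i idxs))),
       pvBSel (fun j => PySem.Str.len (g j)) i idxs) := by
  induction idxs with
  | nil => intro i; simp [pvBSel]
  | cons j rest ih =>
    intro i
    rw [List.map_cons, List.foldl_cons, pvBSel_cons]
    by_cases h : PySem.Str.len (g j) < PySem.Str.len (g i)
    · simp only [if_pos h]
      have : pvAScanStep (some (PySem.Str.len (g i)), i) (j, g j)
          = (some (PySem.Str.len (g j)), j) := by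
        simp only [pvAScanStep]; rw [if_pos h]
      rw [this]; exact ih j
    · simp only [if_neg h]
      have : pvAScanStep (some (PySem.Str.len (g i)), i) (j, g j)
          = (some (PySem.Str.len (g i)), i) := by
        simp only [pvAScanStep]; rw [if_neg h]
      rw [this]; exact ih i

theorem pvset_erase {α : Type} (s : List α) (k : Nat) (m : α) (h : k + 1 < s.length) :
    (s.set k m).eraseIdx (k + 1) = s.take k ++ m :: s.drop (k + 2) := by
  induction s generalizing k with
  | nil => simp at h
  | cons x t ih =>
    cases k with
    | zero =>
      simp only [List.set, List.eraseIdx, List.take, List.drop]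
      cases t with
      | nil => simp at h
      | cons y u => simp [List.eraseIdx]
    | succ k =>
      simp only [List.set, List.eraseIdx, List.take, List.drop, List.length_cons] at h ⊢
      rw [ih k (by omega)]
      simp

theorem pvAStep_eq (s : List String) (h2 : 2 ≤ s.length) :
    pvAStep s = some (pvAbsStep s) := by
  have hn1 : (0 : Int) < (s.length : Int) - 1 := by
    have : (2 : Int) ≤ (s.length : Int) := by exact_mod_cast h2
    omega
  unfold pvAStep
  rw [PySem.List.slice_to_neg_one, PySem.List.enumerate_eq_map_pyRange _ ""]
  have hlen : PySem.List.len s.dropLast = PySem.List.len s - 1 := by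
    simp only [PySem.List.len_eq, List.length_dropLast]
    omega
  rw [hlen]
  have hmapeq : List.map (fun j => (j, PySem.List.pyGetD s.dropLast j ""))
        (PySem.List.pyRange 0 (PySem.List.len s - 1))
      = List.map (fun j => (j, PySem.List.pyGetD s j ""))
        (PySem.List.pyRange 0 (PySem.List.len s - 1)) := by
    apply List.map_congr_left
    intro j hj
    rcases PySem.List.mem_pyRange_one.mp hj with ⟨h0, h1⟩
    have hjlt : j.toNat < s.length - 1 := by
      simp only [PySem.List.len_eq] at h1; omega
    rw [PySem.List.pyGetD_of_nonneg _ _ h0, PySem.List.pyGetD_of_nonneg _ _ h0]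
    rw [List.getD_eq_getElem?_getD, List.getD_eq_getElem?_getD]
    rw [List.getElem?_dropLast]
    simp [hjlt]
  rw [hmapeq]
  have hlen' : PySem.List.len s - 1 = ((s.length : Int) - 1) := by simp [PySem.List.len_eq]
  rw [hlen', PySem.List.pyRange_one_cons hn1]
  rw [List.map_cons, List.foldl_cons]
  have hfirst : pvAScanStep (none, 0) ((0 : Int), PySem.List.pyGetD s 0 "")
      = (some (PySem.Str.len (PySem.List.pyGetD s 0 "")), 0) := rfl
  rw [hfirst, pvscan_fold (fun j => PySem.List.pyGetD s j "")]
  have hqdef : pvBSel (fun j => PySem.Str.len (PySem.List.pyGetD s j "")) 0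
      (PySem.List.pyRange (0 + 1) ((s.length : Int) - 1)) = pvQIdx s := by
    unfold pvQIdx
    simp only [PySem.List.len_eq]
    norm_num
  rw [hqdef]
  obtain ⟨hq0, hq1⟩ := pvQIdx_bounds s h2
  obtain ⟨k, hk⟩ : ∃ k : Nat, pvQIdx s = (k : Int) :=
    ⟨(pvQIdx s).toNat, (Int.toNat_of_nonneg hq0).symm⟩
  have hklt : k + 1 < s.length := by
    rw [hk] at hq1; omega
  rw [hk]
  have hg1 : PySem.List.pyGet? s (k : Int) = some s[k] := by
    rw [PySem.List.pyGet?_natCast, List.getElem?_eq_getElem (by omega : k < s.length)]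
  have hcast1 : ((k : Int) + 1) = ((k + 1 : Nat) : Int) := by push_cast; ring
  have hg2 : PySem.List.pyGet? s ((k : Int) + 1) = some s[k + 1] := by
    rw [hcast1, PySem.List.pyGet?_natCast, List.getElem?_eq_getElem hklt]
  simp only [hg1, hg2, Int.toNat_natCast]
  have hpop : PySem.List.pop? (s.set k (s[k] ++ " " ++ s[k + 1])) ((k : Int) + 1)
      = some ((s.set k (s[k] ++ " " ++ s[k + 1]))[k + 1]'(by simpa using hklt),
              (s.set k (s[k] ++ " " ++ s[k + 1])).eraseIdx (k + 1)) := by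
    rw [hcast1]
    exact PySem.List.pop?_natCast _ (k + 1) (by simpa using hklt)
  rw [hpop]
  simp only [Option.map_some, Option.some.injEq]
  rw [pvset_erase s k _ hklt]
  unfold pvAbsStep
  rw [hk]
  simp only [Int.toNat_natCast]
  have hd1 : s.getD k "" = s[k] := by
    rw [List.getD_eq_getElem?_getD, List.getElem?_eq_getElem (by omega : k < s.length)]
    rfl
  have hd2 : s.getD (k + 1) "" = s[k + 1] := by
    rw [List.getD_eq_getElem?_getD, List.getElem?_eq_getElem hklt]
    rfl
  rw [hd1, hd2]

theorem pvAbsStep_length (s : List String) (h2 : 2 ≤ s.length) :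
    (pvAbsStep s).length + 1 = s.length := by
  obtain ⟨hq0, hq1⟩ := pvQIdx_bounds s h2
  unfold pvAbsStep
  simp only [List.length_append, List.length_take, List.length_cons, List.length_drop]
  omega

theorem pvALoop_eq_abs (fuel : Nat) (s : List String) (target : Int)
    (hpre : 1 ≤ target ∨ (s.length : Int) ≤ target) :
    pvALoop fuel s target = pvAbsLoop fuel s target := by
  induction fuel generalizing s with
  | zero => rfl
  | succ f ih =>
    simp only [pvALoop, pvAbsLoop]
    by_cases hlt : target < PySem.List.len s
    · have h2 : 2 ≤ s.length := by
        rcases hpre with h1 | h1 <;> simp only [PySem.List.len_eq] at hlt <;> omega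
      rw [if_pos hlt, if_pos hlt, pvAStep_eq s h2]
      refine ih (pvAbsStep s) ?_
      rcases hpre with h1 | h1
      · exact Or.inl h1
      · have := pvAbsStep_length s h2
        simp only [PySem.List.len_eq] at hlt
        omega
    · rw [if_neg hlt, if_neg hlt]

-- ---------- segment tree correctness ----------

@[simp] theorem pvCombine_none_right (a : Option (Int × Int)) : pvCombine a none = a := by
  cases a <;> rfl

theorem pvCombine_none_left (b : Option (Int × Int)) : pvCombine none b = b := rfl

theorem pvCombine_assoc (a b c : Option (Int × Int)) :
    pvCombine (pvCombine a b) c = pvCombine a (pvCombine b c) := by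
  rcases a with _ | x
  · rfl
  rcases b with _ | y
  · rfl
  rcases c with _ | z
  · simp
  · by_cases h1 : y.1 < x.1 <;> by_cases h2 : z.1 < y.1 <;> by_cases h3 : z.1 < x.1 <;>
      simp [pvCombine, h1, h2, h3] <;> omega

theorem pvFoldl_combine_shift (l : List (Option (Int × Int))) :
    ∀ a, l.foldl pvCombine a = pvCombine a (l.foldl pvCombine none) := by
  induction l with
  | nil => intro a; simp [List.foldl]
  | cons x xs ih =>
    intro a
    simp only [List.foldl_cons]
    rw [ih (pvCombine a x), ih (pvCombine none x), ← pvCombine_assoc]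
    rfl

def pvFold (lo hi : Int) (f : Int → Option (Int × Int)) : Option (Int × Int) :=
  ((PySem.List.pyRange lo hi 1).map f).foldl pvCombine none

def pvRep (f : Int → Option (Int × Int)) : Int → Int → PVTree → Prop
  | lo, hi, .leaf v => hi = lo + 1 ∧ v = f lo
  | lo, hi, .node v l r =>
      lo + 1 < hi ∧
      pvRep f lo (PySem.Int.floordiv (lo + hi) 2) l ∧
      pvRep f (PySem.Int.floordiv (lo + hi) 2) hi r ∧
      v = pvCombine l.root r.root

theorem pvMid_bounds {lo hi : Int} (h : lo + 1 < hi) :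
    lo < PySem.Int.floordiv (lo + hi) 2 ∧ PySem.Int.floordiv (lo + hi) 2 < hi := by
  rw [PySem.Int.floordiv_eq_ediv_of_pos (by omega : (0:Int) < 2)]
  omega

theorem pvRep_congr {f g : Int → Option (Int × Int)} :
    ∀ (t : PVTree) (lo hi : Int), pvRep f lo hi t →
    (∀ p, lo ≤ p → p < hi → f p = g p) → pvRep g lo hi t := by
  intro t
  induction t with
  | leaf v => intro lo hi hr hfg; obtain ⟨h1, h2⟩ := hr; exact ⟨h1, by rw [h2, hfg lo (by omega) (by omega)]⟩
  | node v l r ihl ihr =>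
    intro lo hi hr hfg
    obtain ⟨h1, hl, hr', hv⟩ := hr
    obtain ⟨hm1, hm2⟩ := pvMid_bounds h1
    exact ⟨h1, ihl _ _ hl (fun p hp1 hp2 => hfg p hp1 (by omega)),
           ihr _ _ hr' (fun p hp1 hp2 => hfg p (by omega) hp2), hv⟩

theorem pvFold_split (lo m hi : Int) (f : Int → Option (Int × Int))
    (h1 : lo ≤ m) (h2 : m ≤ hi) :
    pvFold lo hi f = pvCombine (pvFold lo m f) (pvFold m hi f) := by
  unfold pvFold
  rw [PySem.List.pyRange_one_append lo m hi h1 h2, List.map_append, List.foldl_append,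
      pvFoldl_combine_shift]

theorem pvRoot_spec {f : Int → Option (Int × Int)} :
    ∀ (t : PVTree) (lo hi : Int), pvRep f lo hi t → t.root = pvFold lo hi f := by
  intro t
  induction t with
  | leaf v =>
    intro lo hi hr
    obtain ⟨h1, h2⟩ := hr
    subst h1
    simp [PVTree.root, pvFold, PySem.List.pyRange_one_singleton, h2, pvCombine]
  | node v l r ihl ihr =>
    intro lo hi hr
    obtain ⟨h1, hl, hr', hv⟩ := hr
    obtain ⟨hm1, hm2⟩ := pvMid_bounds h1
    rw [PVTree.root, hv, ihl _ _ hl, ihr _ _ hr',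
        pvFold_split lo (PySem.Int.floordiv (lo + hi) 2) hi f (by omega) (by omega)]

theorem pvUpdate_spec {f : Int → Option (Int × Int)} (v : Option (Int × Int)) :
    ∀ (t : PVTree) (lo hi p : Int), pvRep f lo hi t → lo ≤ p → p < hi →
    pvRep (fun q => if q = p then v else f q) lo hi (pvUpdate t lo hi p v) := by
  intro t
  induction t with
  | leaf w =>
    intro lo hi p hr hp1 hp2
    obtain ⟨h1, _⟩ := hr
    simp only [pvUpdate]
    rw [if_pos (by omega)]
    refine ⟨h1, ?_⟩
    have : lo = p := by omega
    simp [this]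
  | node w l r ihl ihr =>
    intro lo hi p hr hp1 hp2
    obtain ⟨h1, hl, hr', hv⟩ := hr
    obtain ⟨hm1, hm2⟩ := pvMid_bounds h1
    simp only [pvUpdate]
    rw [if_neg (by omega)]
    by_cases hpm : p < PySem.Int.floordiv (lo + hi) 2
    · rw [if_pos hpm]
      exact ⟨h1, ihl lo _ p hl hp1 hpm,
        pvRep_congr r _ hi hr' (fun q hq1 hq2 => by rw [if_neg (by omega)]), rfl⟩
    · rw [if_neg hpm]
      exact ⟨h1, pvRep_congr l lo _ hl (fun q hq1 hq2 => by rw [if_neg (by omega)]),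
        ihr _ hi p hr' (by omega) hp2, rfl⟩

theorem pvBuild_spec (vals : List (Option (Int × Int))) :
    ∀ (k : Nat) (lo hi : Int), (hi - lo).toNat ≤ k → lo < hi →
    pvRep (fun p => PySem.List.pyGetD vals p none) lo hi (pvBuild lo hi vals) := by
  intro k
  induction k with
  | zero => intro lo hi hle hlt; omega
  | succ k ih =>
    intro lo hi hle hlt
    by_cases hsmall : hi ≤ lo + 1
    · rw [pvBuild, dif_pos hsmall]
      exact ⟨by omega, rfl⟩
    · have h1 : lo + 1 < hi := by omega
      obtain ⟨hm1, hm2⟩ := pvMid_bounds h1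
      rw [pvBuild, dif_neg hsmall]
      exact ⟨h1, ih lo _ (by omega) hm1, ih _ hi (by omega) hm2, rfl⟩

-- ---------- selection transport ----------

theorem pvFoldSelHom {α β : Type} (f : α → β) (ka : α → Int) (kb : β → Int) :
    ∀ (xs : List α) (x : α), (∀ a, a ∈ x :: xs → kb (f a) = ka a) →
    (xs.map f).foldl (fun p q => if kb q < kb p then q else p) (f x)
    = f (xs.foldl (fun p q => if ka q < ka p then q else p) x) := by
  intro xs
  induction xs with
  | nil => intro x _; rfl
  | cons y ys ih =>
    intro x hk
    simp only [List.map_cons, List.foldl_cons]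
    rw [hk x (by simp), hk y (by simp)]
    by_cases h : ka y < ka x
    · rw [if_pos h, if_pos h]
      exact ih y (fun a ha => hk a (by simp at ha ⊢; tauto))
    · rw [if_neg h, if_neg h]
      exact ih x (fun a ha => hk a (by simp at ha ⊢; tauto))

theorem pvFold_skip_none {α : Type} (g : α → Option (Int × Int)) :
    ∀ (xs : List α) (a : Option (Int × Int)),
    (xs.map g).foldl pvCombine a = ((xs.filterMap g).map some).foldl pvCombine a := by
  intro xs
  induction xs with
  | nil => intro a; rfl
  | cons x xs ih =>
    intro a
    cases hx : g x with
    | none => simp only [List.map_cons, List.foldl_cons, hx, List.filterMap_cons, pvCombine_none_right, ih]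
    | some y => simp only [List.map_cons, List.foldl_cons, hx, List.filterMap_cons, ih]

theorem pvFold_some (xs : List (Int × Int)) : ∀ (x : Int × Int),
    (xs.map some).foldl pvCombine (some x)
    = some (xs.foldl (fun p q => if q.1 < p.1 then q else p) x) := by
  induction xs with
  | nil => intro x; rfl
  | cons y ys ih =>
    intro x
    simp only [List.map_cons, List.foldl_cons]
    show (ys.map some).foldl pvCombine (if y.1 < x.1 then some y else some x) = _
    split_ifs with h <;> rw [ih]

-- ---------- association list over increasing keys ----------

def pvLookup : List (Int × String) → Int → Option String
  | [], _ => none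
  | x :: r, p => if p = x.1 then some x.2 else pvLookup r p

def pvF (L : List (Int × String)) (tail : Int) (p : Int) : Option (Int × Int) :=
  if p = tail then none else (pvLookup L p).map (fun s => (PySem.Str.len s, p))

def pvG (g : List (Int × String)) (p : Int) : Option (Int × Int) :=
  (pvLookup g p).map (fun s => (PySem.Str.len s, p))

theorem pvLookup_append (g h : List (Int × String)) (p : Int) :
    pvLookup (g ++ h) p = (pvLookup g p).orElse (fun _ => pvLookup h p) := by
  induction g with
  | nil => rfl
  | cons x xs ih =>
    obtain ⟨k, v⟩ := x
    by_cases h' : p = k <;> simp [pvLookup, h', ih]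

theorem pvLookup_eq_none (g : List (Int × String)) (p : Int)
    (h : ∀ pr ∈ g, pr.1 ≠ p) : pvLookup g p = none := by
  induction g with
  | nil => rfl
  | cons x xs ih =>
    obtain ⟨k, v⟩ := x
    have : p ≠ k := fun he => h (k, v) (by simp) (by omega)
    simp [pvLookup, this, ih (fun pr hpr => h pr (by simp [hpr]))]

theorem pvLookup_of_mem (g : List (Int × String)) (p : Int) (s : String)
    (hnd : (g.map Prod.fst).Nodup) (hmem : (p, s) ∈ g) : pvLookup g p = some s := by
  induction g with
  | nil => simp at hmem
  | cons x xs ih =>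
    obtain ⟨k, v⟩ := x
    simp only [List.map_cons, List.nodup_cons] at hnd
    rcases List.mem_cons.mp hmem with h | h
    · obtain ⟨h1, h2⟩ := Prod.mk.injEq .. ▸ h
      injection h with h1 h2
      subst h1; subst h2
      simp [pvLookup]
    · have : p ≠ k := by
        intro he; subst he
        exact hnd.1 (List.mem_map.mpr ⟨(p, s), h, rfl⟩)
      simp [pvLookup, this, ih hnd.2 h]

-- the candidates the tree holds are exactly the non-tail pairs, in position order
theorem pvFilterRange : ∀ (g : List (Int × String)) (lo hi : Int),
    (g.map Prod.fst).Pairwise (· < ·) →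
    (∀ pr ∈ g, lo ≤ pr.1 ∧ pr.1 < hi) →
    (PySem.List.pyRange lo hi 1).filterMap (pvG g)
      = g.map (fun pr => (PySem.Str.len pr.2, pr.1)) := by
  intro g
  induction g with
  | nil =>
    intro lo hi _ _
    simp [pvG, pvLookup]
  | cons x g' ih =>
    obtain ⟨p0, s0⟩ := x
    intro lo hi hps hrg
    simp only [List.map_cons, List.pairwise_cons] at hps
    obtain ⟨hp0lo, hp0hi⟩ := hrg (p0, s0) (by simp)
    have hgt : ∀ pr ∈ g', p0 < pr.1 := fun pr hpr =>
      hps.1 pr.1 (List.mem_map.mpr ⟨pr, hpr, rfl⟩)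
    rw [PySem.List.pyRange_one_append lo p0 hi hp0lo (by omega),
        PySem.List.pyRange_one_cons (show p0 < hi by omega),
        List.filterMap_append, List.filterMap_cons]
    have h0 : pvG ((p0, s0) :: g') p0 = some (PySem.Str.len s0, p0) := by
      simp [pvG, pvLookup]
    rw [h0]
    have hleft : (PySem.List.pyRange lo p0 1).filterMap (pvG ((p0, s0) :: g')) = [] := by
      rw [List.filterMap_eq_nil_iff]
      intro a ha
      obtain ⟨_, ha2⟩ := PySem.List.mem_pyRange_one.mp ha
      have h1 : a ≠ p0 := by omega
      have h2 : pvLookup g' a = none :=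
        pvLookup_eq_none g' a (fun pr hpr => by have := hgt pr hpr; omega)
      simp [pvG, pvLookup, h1, h2]
    have hright : (PySem.List.pyRange (p0 + 1) hi 1).filterMap (pvG ((p0, s0) :: g'))
        = (PySem.List.pyRange (p0 + 1) hi 1).filterMap (pvG g') := by
      apply List.filterMap_congr
      intro a ha
      obtain ⟨ha1, _⟩ := PySem.List.mem_pyRange_one.mp ha
      have : a ≠ p0 := by omega
      simp [pvG, pvLookup, this]
    rw [hleft, hright, ih (p0 + 1) hi hps.2 (fun pr hpr => ⟨by have := hgt pr hpr; omega,
        (hrg pr (by simp [hpr])).2⟩)]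
    simp

-- ---------- the linked structure invariant ----------

structure PvInv (n : Int) (L : List (Int × String)) (texts : PySem.Dict Int String)
    (nxt : PySem.Dict Int Int) (tail : Int) (tree : PVTree) (count : Int) : Prop where
  hne : L ≠ []
  hps : (L.map Prod.fst).Pairwise (· < ·)
  hrange : ∀ pr ∈ L, 0 ≤ pr.1 ∧ pr.1 < n
  hhead : (L.map Prod.fst).head? = some 0
  hlen : L.length ≤ n.toNat
  htexts : ∀ pr ∈ L, texts.get? pr.1 = some pr.2
  hnxt : ∀ (t : Nat) (h : t + 1 < L.length), nxt.get? ((L[t]'(by omega)).1) = some ((L[t+1]'h).1)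
  htail : (L.map Prod.fst).getLast? = some tail
  hcount : count = (L.length : Int)
  htree : pvRep (pvF L tail) 0 n tree

-- root of the tree = the pair at the abstract merge index
theorem pvRoot_eq (n : Int) (L : List (Int × String)) (tail : Int) (tree : PVTree)
    (hps : (L.map Prod.fst).Pairwise (· < ·))
    (hrange : ∀ pr ∈ L, 0 ≤ pr.1 ∧ pr.1 < n)
    (htail : (L.map Prod.fst).getLast? = some tail)
    (htree : pvRep (pvF L tail) 0 n tree)
    (h2 : 2 ≤ L.length) :
    tree.root = some (PySem.Str.len (((L.map Prod.snd).getD (pvQIdx (L.map Prod.snd)).toNat "")),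
      ((L.getD (pvQIdx (L.map Prod.snd)).toNat (0, "")).1)) := by
  have hne : L ≠ [] := by intro h; subst h; simp at h2
  set s := L.map Prod.snd with hs
  set g := L.dropLast with hg
  have hmlen : s.length = L.length := by simp [hs]
  have hglen : g.length = L.length - 1 := by simp [hg]
  have hLsplit : g ++ [L.getLast hne] = L := List.dropLast_append_getLast hne
  have htailval : tail = (L.getLast hne).1 := by
    rw [List.getLast?_eq_getElem?] at htail
    have : (L.map Prod.fst)[(L.map Prod.fst).length - 1]? = some ((L.getLast hne).1) := by
      rw [List.getElem?_eq_getElem (by simp; omega)]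
      simp [List.getLast_eq_getElem]
    rw [this] at htail
    exact (Option.some.injEq .. ▸ htail.symm)
  have hkeys_lt : ∀ pr ∈ g, pr.1 < tail := by
    intro pr hpr
    rw [htailval]
    obtain ⟨t, ht, hteq⟩ := List.getElem_of_mem hpr
    have ht' : t < L.length - 1 := by omega
    have h1 : pr.1 = (L.map Prod.fst)[t]'(by simp; omega) := by
      rw [← hteq]; simp [hg, List.getElem_dropLast]
    have h2 : (L.getLast hne).1 = (L.map Prod.fst)[L.length - 1]'(by simp; omega) := by
      simp [List.getLast_eq_getElem]
    rw [h1, h2]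
    exact List.pairwise_iff_getElem.mp hps t (L.length - 1) (by simp; omega) (by simp; omega)
      (by omega)
  have hFG : pvF L tail = pvG g := by
    funext p
    unfold pvF pvG
    by_cases hp : p = tail
    · subst hp
      rw [if_pos rfl, pvLookup_eq_none g p (fun pr hpr => by have := hkeys_lt pr hpr; omega)]
      rfl
    · rw [if_neg hp, ← hLsplit, pvLookup_append]
      cases h : pvLookup g p with
      | none => simp [pvLookup, Option.orElse, ← htailval, hp]
      | some w => simp [Option.orElse]
  have hroot := pvRoot_spec tree 0 n htree
  rw [hroot]
  unfold pvFold
  rw [hFG, pvFold_skip_none (pvG g)]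
  have hgps : (g.map Prod.fst).Pairwise (· < ·) := by
    have hsub : (g.map Prod.fst).Sublist (L.map Prod.fst) := (List.dropLast_sublist L).map _
    exact hps.sublist hsub
  have hgrng : ∀ pr ∈ g, 0 ≤ pr.1 ∧ pr.1 < n := fun pr hpr =>
    hrange pr ((List.dropLast_sublist L).subset hpr)
  rw [pvFilterRange g 0 n hgps hgrng]
  -- reconstruct g as head :: indexed tail and transport the selection to index form
  have hglen' : PySem.List.len g = (L.length : Int) - 1 := by
    simp only [PySem.List.len_eq, hglen]
    omega
  have hgrec : (PySem.List.pyRange 0 ((L.length : Int) - 1) 1).map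
      (fun j => PySem.List.pyGetD g j (0, "")) = g := by
    rw [← hglen']
    exact PySem.List.map_pyGetD_pyRange_zero g (0, "")
  have h0lt : (0 : Int) < (L.length : Int) - 1 := by
    have : (2 : Int) ≤ (L.length : Int) := by exact_mod_cast h2
    omega
  rw [PySem.List.pyRange_one_cons h0lt, List.map_cons] at hgrec
  have hidx : ∀ (j : Int) (hj1 : 0 ≤ j) (hj2 : j < (L.length : Int) - 1),
      PySem.List.pyGetD g j (0, "") = L[j.toNat]'(by omega) := by
    intro j hj1 hj2
    rw [PySem.List.pyGetD_eq_getElem g (0, "") hj1 (by omega)]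
    exact List.getElem_dropLast _
  have hkey : ∀ (j : Int), j ∈ (0 : Int) :: PySem.List.pyRange (0 + 1) ((L.length : Int) - 1) 1 →
      Prod.fst ((fun j : Int => ((PySem.Str.len (PySem.List.pyGetD g j (0, "")).2,
          (PySem.List.pyGetD g j (0, "")).1) : Int × Int)) j)
        = PySem.Str.len (PySem.List.pyGetD s j "") := by
    intro j hj
    have hjb : 0 ≤ j ∧ j < (L.length : Int) - 1 := by
      rcases List.mem_cons.mp hj with h | h
      · subst h; omega
      · obtain ⟨hh1, hh2⟩ := PySem.List.mem_pyRange_one.mp h; omega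
    obtain ⟨hj1, hj2⟩ := hjb
    have hsl : j < (s.length : Int) := by rw [hmlen]; omega
    rw [PySem.List.pyGetD_eq_getElem s "" hj1 hsl]
    simp only [hidx j hj1 hj2]
    simp [hs]
  rw [← hgrec, List.map_cons, List.map_cons, List.foldl_cons, pvCombine_none_left,
      pvFold_some, List.map_map]
  simp only [Function.comp_def]
  rw [pvFoldSelHom (fun j : Int => ((PySem.Str.len (PySem.List.pyGetD g j (0, "")).2,
        (PySem.List.pyGetD g j (0, "")).1) : Int × Int))
      (fun j => PySem.Str.len (PySem.List.pyGetD s j "")) Prod.fst _ _ hkey]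
  have hqeq : (PySem.List.pyRange (0 + 1) ((L.length : Int) - 1) 1).foldl
      (fun p q => if PySem.Str.len (PySem.List.pyGetD s q "") <
        PySem.Str.len (PySem.List.pyGetD s p "") then q else p) 0 = pvQIdx s := by
    unfold pvQIdx pvBSel
    simp only [PySem.List.len_eq, hmlen]
    norm_num
  rw [hqeq]
  have hs2 : 2 ≤ s.length := by omega
  obtain ⟨hq0, hq1⟩ := pvQIdx_bounds s hs2
  have hq1' : pvQIdx s < (L.length : Int) - 1 := by rw [hmlen] at hq1; omega
  rw [hidx (pvQIdx s) hq0 hq1']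
  have hqlt : (pvQIdx s).toNat < L.length := by omega
  have hd1 : s.getD (pvQIdx s).toNat "" = (L[(pvQIdx s).toNat]'hqlt).2 := by
    rw [List.getD_eq_getElem?_getD, List.getElem?_eq_getElem (by omega : (pvQIdx s).toNat < s.length)]
    simp [hs]
  have hd2 : L.getD (pvQIdx s).toNat (0, "") = L[(pvQIdx s).toNat]'hqlt := by
    rw [List.getD_eq_getElem?_getD, List.getElem?_eq_getElem hqlt]
    rfl
  rw [hd1, hd2]

-- one iteration of Source B preserves the invariant and performs the abstract merge
theorem pvSimStep (n : Int) (L : List (Int × String))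
    (texts : PySem.Dict Int String) (nxt : PySem.Dict Int Int) (tail : Int) (tree : PVTree)
    (count : Int) (hinv : PvInv n L texts nxt tail tree count) (h2 : 2 ≤ L.length) :
    ∃ L', PvInv n L' (pvBIter n (texts, nxt, tail, tree, count)).1
        (pvBIter n (texts, nxt, tail, tree, count)).2.1
        (pvBIter n (texts, nxt, tail, tree, count)).2.2.1
        (pvBIter n (texts, nxt, tail, tree, count)).2.2.2.1
        (pvBIter n (texts, nxt, tail, tree, count)).2.2.2.2
      ∧ L'.map Prod.snd = pvAbsStep (L.map Prod.snd) ∧ L'.length + 1 = L.length := by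
  obtain ⟨hne, hps, hrange, hhead, hlen, htexts, hnxt, htail, hcount, htree⟩ := hinv
  set m := L.length with hm
  set s := L.map Prod.snd with hsdef
  have hslen : s.length = m := by rw [hsdef, List.length_map]
  have hs2 : 2 ≤ s.length := by omega
  obtain ⟨hq0, hq1⟩ := pvQIdx_bounds s hs2
  set q := (pvQIdx s).toNat with hqdef
  have hqm : q < m - 1 := by omega
  have hq1m : q + 1 < m := by omega
  have hqm' : q < m := by omega
  have hlt : ∀ (a b : Nat) (hb : b < m) (_ : a < b), (L[a]'(by omega)).1 < (L[b]'hb).1 := by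
    intro a b hb hab
    have := List.pairwise_iff_getElem.mp hps a b
      (by rw [List.length_map]; omega) (by rw [List.length_map]; omega) hab
    simpa using this
  have hkeyne : ∀ (a b : Nat) (ha : a < m) (hb : b < m) (_ : a ≠ b),
      (L[a]'ha).1 ≠ (L[b]'hb).1 := by
    intro a b ha hb hab
    rcases Nat.lt_or_ge a b with h | h
    · exact ne_of_lt (hlt a b hb h)
    · exact (ne_of_lt (hlt b a ha (by omega))).symm
  have hgetDq : L.getD q (0, "") = L[q]'hqm' := by
    rw [List.getD_eq_getElem?_getD, List.getElem?_eq_getElem hqm']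
    rfl
  have hsq : s.getD q "" = (L[q]'hqm').2 := by
    rw [List.getD_eq_getElem?_getD, List.getElem?_eq_getElem (by omega : q < s.length)]
    simp [hsdef]
  have hsq1 : s.getD (q + 1) "" = (L[q+1]'hq1m).2 := by
    rw [List.getD_eq_getElem?_getD, List.getElem?_eq_getElem (by omega : q + 1 < s.length)]
    simp [hsdef]
  have hroot : tree.root = some (PySem.Str.len (L[q]'hqm').2, (L[q]'hqm').1) := by
    have h := pvRoot_eq n L tail tree hps hrange htail htree h2
    rw [← hsdef, ← hqdef, hsq, hgetDq] at h
    exact h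
  have hnexti : nxt.get? (L[q]'hqm').1 = some ((L[q+1]'hq1m).1) := hnxt q hq1m
  have htexti : texts.getD (L[q]'hqm').1 "" = (L[q]'hqm').2 := by
    rw [PySem.Dict.getD_eq_get?_getD, htexts (L[q]'hqm') (List.getElem_mem _)]
    rfl
  have htextj : texts.getD (L[q+1]'hq1m).1 "" = (L[q+1]'hq1m).2 := by
    rw [PySem.Dict.getD_eq_get?_getD, htexts (L[q+1]'hq1m) (List.getElem_mem _)]
    rfl
  set merged := (L[q]'hqm').2 ++ " " ++ (L[q+1]'hq1m).2 with hmgd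
  set L' := L.take q ++ ((L[q]'hqm').1, merged) :: L.drop (q + 2) with hL'
  have htailv : tail = (L[m-1]'(by omega)).1 := by
    have h1 : (L.map Prod.fst)[m-1]? = some tail := by
      rw [← htail, List.getLast?_eq_getElem?, List.length_map]
    rw [List.getElem?_eq_getElem (by rw [List.length_map]; omega)] at h1
    have h := Option.some.inj h1
    rw [List.getElem_map] at h
    exact h.symm
  have htake_len : (L.take q).length = q := by
    rw [List.length_take]
    omega
  have hL'len : L'.length = m - 1 := by
    rw [hL', List.length_append, List.length_cons, List.length_drop, htake_len]
    omega
  have hg1 : ∀ (t : Nat) (ht : t < q), L'[t]'(by omega) = L[t]'(by omega) := by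
    intro t ht
    rw [List.getElem_of_eq hL' (by omega), List.getElem_append_left (by omega)]
    exact List.getElem_take
  have hg2 : L'[q]'(by omega) = ((L[q]'hqm').1, merged) := by
    rw [List.getElem_of_eq hL' (by omega), List.getElem_append_right (by omega)]
    simp [htake_len]
  have hg3 : ∀ (t : Nat) (ht1 : q < t) (ht2 : t < m - 1), L'[t]'(by omega) = L[t+1]'(by omega) := by
    intro t ht1 ht2
    rw [List.getElem_of_eq hL' (by omega), List.getElem_append_right (by rw [htake_len]; omega)]
    simp only [htake_len]
    rw [List.getElem_cons]
    rw [dif_neg (by omega)]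
    rw [List.getElem_drop]
    congr 1
    omega
  have hfstle : ∀ (u : Nat) (hu : u ≤ q), (L'[u]'(by omega)).1 = (L[u]'(by omega)).1 := by
    intro u hu
    rcases Nat.lt_or_ge u q with h | h
    · rw [hg1 u h]
    · have : u = q := by omega
      subst this
      rw [hg2]
  have hmemL' : ∀ pr ∈ L', pr = ((L[q]'hqm').1, merged) ∨
      ∃ (t : Nat) (ht : t < m), t ≠ q ∧ t ≠ q + 1 ∧ L[t]'ht = pr := by
    intro pr hpr
    obtain ⟨t, ht, rfl⟩ := List.mem_iff_getElem.mp hpr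
    rcases Nat.lt_or_ge t q with h1 | h1
    · exact Or.inr ⟨t, by omega, by omega, by omega, (hg1 t h1).symm⟩
    rcases Nat.eq_or_lt_of_le h1 with h2 | h2
    · left
      subst h2
      exact hg2
    · exact Or.inr ⟨t + 1, by omega, by omega, by omega,
        (hg3 t h2 (by omega)).symm⟩
  have hiq : (L[q]'hqm').1 ≠ (L[q+1]'hq1m).1 := hkeyne q (q+1) hqm' hq1m (by omega)
  have hjnotin : ∀ pr ∈ L', pr.1 ≠ (L[q+1]'hq1m).1 := by
    intro pr hpr
    rcases hmemL' pr hpr with h | ⟨t, ht, htq, htq1, hteq⟩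
    · rw [h]
      exact hiq
    · rw [← hteq]
      exact hkeyne t (q+1) ht hq1m htq1
  have hmapfst : L'.map Prod.fst = (L.map Prod.fst).take q ++
      (L[q]'hqm').1 :: (L.map Prod.fst).drop (q + 2) := by
    rw [hL', List.map_append, List.map_cons, List.map_take, List.map_drop]
  have hLdecomp : L = L.take q ++ L[q]'hqm' :: L[q+1]'hq1m :: L.drop (q + 2) := by
    conv_lhs => rw [← List.take_append_drop q L]
    congr 1
    rw [List.drop_eq_getElem_cons hqm']
    congr 1
    rw [List.drop_eq_getElem_cons hq1m]
  have hMdecomp : L.map Prod.fst = (L.map Prod.fst).take q ++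
      (L[q]'hqm').1 :: (L[q+1]'hq1m).1 :: (L.map Prod.fst).drop (q + 2) := by
    conv_lhs => rw [hLdecomp]
    rw [List.map_append, List.map_cons, List.map_cons, List.map_take, List.map_drop]
  have hsub : (L'.map Prod.fst).Sublist (L.map Prod.fst) := by
    rw [hmapfst]
    conv_rhs => rw [hMdecomp]
    exact ((List.sublist_cons_self _ _).cons₂ _).append_left _
  have hps' : (L'.map Prod.fst).Pairwise (· < ·) := hps.sublist hsub
  have hnodup' : (L'.map Prod.fst).Nodup := hps'.imp (fun h => ne_of_lt h)
  have hrange' : ∀ pr ∈ L', 0 ≤ pr.1 ∧ pr.1 < n := by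
    intro pr hpr
    have h1 : pr.1 ∈ L.map Prod.fst := hsub.subset (List.mem_map_of_mem hpr)
    obtain ⟨pr2, hpr2, heq⟩ := List.mem_map.mp h1
    rw [← heq]
    exact hrange pr2 hpr2
  have hL0 : (L[0]'(by omega)).1 = 0 := by
    rw [List.head?_eq_getElem?, List.getElem?_eq_getElem (by rw [List.length_map]; omega)] at hhead
    have h := Option.some.inj hhead
    rw [List.getElem_map] at h
    exact h
  have hhead' : (L'.map Prod.fst).head? = some 0 := by
    rw [List.head?_eq_getElem?, List.getElem?_eq_getElem (by rw [List.length_map]; omega)]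
    rw [List.getElem_map]
    rw [hfstle 0 (by omega), hL0]
  have htexts' : ∀ pr ∈ L', (texts.insert (L[q]'hqm').1 merged).get? pr.1 = some pr.2 := by
    intro pr hpr
    rcases hmemL' pr hpr with h | ⟨t, ht, htq, htq1, hteq⟩
    · rw [h]
      exact PySem.Dict.get?_insert_self _ _ _
    · have hne2 : pr.1 ≠ (L[q]'hqm').1 := by
        rw [← hteq]
        exact hkeyne t q ht hqm' htq
      rw [PySem.Dict.get?_insert_of_ne _ _ hne2]
      exact htexts pr (hteq ▸ List.getElem_mem ht)
  have hsnd' : L'.map Prod.snd = pvAbsStep (L.map Prod.snd) := by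
    rw [hL', List.map_append, List.map_cons, List.map_take, List.map_drop]
    simp only [pvAbsStep, ← hsdef, ← hqdef, hsq, hsq1]
    rfl
  have hlookL : ∀ p, p ≠ (L[q]'hqm').1 → p ≠ (L[q+1]'hq1m).1 →
      pvLookup L p = pvLookup L' p := by
    intro p hpi hpj
    conv_lhs => rw [hLdecomp]
    rw [hL', pvLookup_append, pvLookup_append]
    have h1 : pvLookup (L[q]'hqm' :: L[q+1]'hq1m :: L.drop (q + 2)) p
        = pvLookup (L.drop (q + 2)) p := by
      simp [pvLookup, hpi, hpj]
    have h2 : pvLookup (((L[q]'hqm').1, merged) :: L.drop (q + 2)) p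
        = pvLookup (L.drop (q + 2)) p := by
      simp [pvLookup, hpi]
    rw [h1, h2]
  have hmidmem : ((L[q]'hqm').1, merged) ∈ L' := by
    rw [List.mem_iff_getElem]
    exact ⟨q, by omega, hg2⟩
  have hiter : pvBIter n (texts, nxt, tail, tree, count) =
      if (L[q+1]'hq1m).1 = tail then
        (texts.insert (L[q]'hqm').1 merged, nxt, (L[q]'hqm').1,
          pvUpdate tree 0 n (L[q]'hqm').1 none, count - 1)
      else
        (texts.insert (L[q]'hqm').1 merged,
          nxt.insert (L[q]'hqm').1 (nxt.getD (L[q+1]'hq1m).1 0), tail,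
          pvUpdate (pvUpdate tree 0 n (L[q]'hqm').1
            (some (PySem.Str.len merged, (L[q]'hqm').1))) 0 n (L[q+1]'hq1m).1 none,
          count - 1) := by
    simp only [pvBIter, hroot, hnexti, htexti, htextj, PySem.Dict.getD_insert_self]
    rw [← hmgd]
  have hibound := hrange (L[q]'hqm') (List.getElem_mem _)
  have hjbound := hrange (L[q+1]'hq1m) (List.getElem_mem _)
  refine ⟨L', ?_⟩
  rw [hiter]
  have hne' : L' ≠ [] := by
    intro h
    rw [h] at hL'len
    simp only [List.length_nil] at hL'len
    omega
  by_cases hcase : (L[q+1]'hq1m).1 = tail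
  · -- the merged block absorbs the tail and becomes the new tail
    have hq2m : q + 1 = m - 1 := by
      by_contra hq2
      have hlt2 := hlt (q+1) (m-1) (by omega) (by omega)
      rw [← htailv] at hlt2
      omega
    rw [if_pos hcase]
    dsimp only
    refine ⟨⟨hne', hps', hrange', hhead', by omega, htexts', ?_, ?_, by omega, ?_⟩,
      hsnd', by omega⟩
    · intro t ht
      rw [hfstle t (by omega), hfstle (t+1) (by omega)]
      exact hnxt t (by omega)
    · rw [List.getLast?_eq_getElem?,
        List.getElem?_eq_getElem (by rw [List.length_map, hL'len]; omega)]
      rw [List.getElem_map]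
      simp only [List.length_map, hL'len]
      have h6 : m - 1 - 1 = q := by omega
      simp only [h6]
      rw [hfstle q (le_refl q)]
    · have h1 := pvUpdate_spec none tree 0 n (L[q]'hqm').1 htree hibound.1 hibound.2
      apply pvRep_congr _ 0 n h1
      intro p hp1 hp2
      by_cases hpi : p = (L[q]'hqm').1
      · rw [if_pos hpi]
        unfold pvF
        rw [if_pos hpi]
      · rw [if_neg hpi]
        unfold pvF
        by_cases hpt : p = tail
        · rw [if_pos hpt, if_neg hpi]
          have hptj : p = (L[q+1]'hq1m).1 := by rw [hpt, ← hcase]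
          rw [pvLookup_eq_none L' p (fun pr hpr => by rw [hptj]; exact hjnotin pr hpr)]
          rfl
        · rw [if_neg hpt, if_neg hpi]
          have hpj : p ≠ (L[q+1]'hq1m).1 := by rw [hcase]; exact hpt
          rw [hlookL p hpi hpj]
  · rw [if_neg hcase]
    have hq2m : q + 1 < m - 1 := by
      by_contra hq2
      have h7 : q + 1 = m - 1 := by omega
      apply hcase
      simp only [h7]
      exact htailv.symm
    have hq2mm : q + 2 < m := by omega
    have hc : nxt.getD (L[q+1]'hq1m).1 0 = (L[q+2]'hq2mm).1 := by
      rw [PySem.Dict.getD_eq_get?_getD, hnxt (q+1) hq2mm]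
      rfl
    dsimp only
    refine ⟨⟨hne', hps', hrange', hhead', by omega, htexts', ?_, ?_, by omega, ?_⟩,
      hsnd', by omega⟩
    · intro t ht
      have htm : t + 1 < m - 1 := by omega
      rcases Nat.lt_trichotomy t q with h1 | h1 | h1
      · rw [hfstle t (by omega), hfstle (t+1) (by omega)]
        rw [PySem.Dict.get?_insert_of_ne _ _ (hkeyne t q (by omega) hqm' (by omega))]
        exact hnxt t (by omega)
      · subst h1
        rw [hfstle q (le_refl q), congrArg Prod.fst (hg3 (q+1) (by omega) (by omega))]
        rw [PySem.Dict.get?_insert_self, hc]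
      · rw [congrArg Prod.fst (hg3 t h1 (by omega)),
          congrArg Prod.fst (hg3 (t+1) (by omega) (by omega))]
        rw [PySem.Dict.get?_insert_of_ne _ _ (hkeyne (t+1) q (by omega) hqm' (by omega))]
        exact hnxt (t+1) (by omega)
    · rw [List.getLast?_eq_getElem?,
        List.getElem?_eq_getElem (by rw [List.length_map, hL'len]; omega)]
      rw [List.getElem_map]
      simp only [List.length_map, hL'len]
      have h6 : m - 1 - 1 = m - 2 := by omega
      simp only [h6]
      rw [congrArg Prod.fst (hg3 (m-2) (by omega) (by omega))]
      have h7 : m - 2 + 1 = m - 1 := by omega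
      simp only [h7]
      rw [← htailv]
    · have h1 := pvUpdate_spec (some (PySem.Str.len merged, (L[q]'hqm').1)) tree 0 n
        (L[q]'hqm').1 htree hibound.1 hibound.2
      have h2 := pvUpdate_spec none _ 0 n (L[q+1]'hq1m).1 h1 hjbound.1 hjbound.2
      apply pvRep_congr _ 0 n h2
      intro p hp1 hp2
      dsimp only
      by_cases hpj : p = (L[q+1]'hq1m).1
      · rw [if_pos hpj]
        unfold pvF
        rw [if_neg (show ¬ p = tail from by rw [hpj]; exact hcase)]
        rw [pvLookup_eq_none L' p (fun pr hpr => by rw [hpj]; exact hjnotin pr hpr)]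
        rfl
      · rw [if_neg hpj]
        by_cases hpi : p = (L[q]'hqm').1
        · rw [if_pos hpi]
          unfold pvF
          have hit : ¬ p = tail := by
            rw [hpi, htailv]
            exact hkeyne q (m-1) hqm' (by omega) (by omega)
          rw [if_neg hit, hpi]
          rw [pvLookup_of_mem L' (L[q]'hqm').1 merged hnodup' hmidmem]
          rfl
        · rw [if_neg hpi]
          unfold pvF
          by_cases hpt : p = tail
          · rw [if_pos hpt, if_pos hpt]
          · rw [if_neg hpt, if_neg hpt, hlookL p hpi hpj]

theorem pvBLoop_sim (target n : Int) (htarget : 1 ≤ target) :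
    ∀ (fuel : Nat) (L : List (Int × String)) texts nxt tail tree count,
    PvInv n L texts nxt tail tree count →
    ∃ L', PvInv n L' (pvBLoop target n fuel (texts, nxt, tail, tree, count)).1
        (pvBLoop target n fuel (texts, nxt, tail, tree, count)).2.1
        (pvBLoop target n fuel (texts, nxt, tail, tree, count)).2.2.1
        (pvBLoop target n fuel (texts, nxt, tail, tree, count)).2.2.2.1
        (pvBLoop target n fuel (texts, nxt, tail, tree, count)).2.2.2.2
      ∧ L'.map Prod.snd = pvAbsLoop fuel (L.map Prod.snd) target := by
  intro fuel
  induction fuel with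
  | zero => intro L texts nxt tail tree count hinv; exact ⟨L, hinv, rfl⟩
  | succ f ih =>
    intro L texts nxt tail tree count hinv
    have hcnt : count = (L.length : Int) := hinv.hcount
    simp only [pvBLoop, pvAbsLoop]
    by_cases hlt : target < count
    · have hlt2 : target < PySem.List.len (L.map Prod.snd) := by
        simp only [PySem.List.len_eq, List.length_map]
        omega
      rw [if_pos hlt, if_pos hlt2]
      have h2 : 2 ≤ L.length := by omega
      obtain ⟨L', hinv', hsnd, hlen1⟩ := pvSimStep n L texts nxt tail tree count hinv h2
      obtain ⟨L'', hinv'', habs⟩ := ih L'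
        (pvBIter n (texts, nxt, tail, tree, count)).1
        (pvBIter n (texts, nxt, tail, tree, count)).2.1
        (pvBIter n (texts, nxt, tail, tree, count)).2.2.1
        (pvBIter n (texts, nxt, tail, tree, count)).2.2.2.1
        (pvBIter n (texts, nxt, tail, tree, count)).2.2.2.2 hinv'
      refine ⟨L'', hinv'', ?_⟩
      rw [habs, hsnd]
    · rw [if_neg hlt, if_neg (show ¬ target < PySem.List.len (L.map Prod.snd) by
        simp only [PySem.List.len_eq, List.length_map]; omega)]
      exact ⟨L, hinv, rfl⟩

theorem pvWalk_spec (texts : PySem.Dict Int String) (nxt : PySem.Dict Int Int) (tail : Int) :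
    ∀ (L : List (Int × String)) (fuel : Nat) (p : Int) (out : List String),
    L ≠ [] → L.length ≤ fuel →
    (∀ pr ∈ L, texts.get? pr.1 = some pr.2) →
    (∀ (t : Nat) (h : t + 1 < L.length), nxt.get? ((L[t]'(by omega)).1) = some ((L[t+1]'h).1)) →
    (L.map Prod.fst).getLast? = some tail →
    (L.map Prod.fst).Nodup →
    (L.map Prod.fst).head? = some p →
    pvWalk texts nxt tail fuel p out = out ++ L.map Prod.snd := by
  intro L
  induction L with
  | nil => intro fuel p out h; exact absurd rfl h
  | cons pr0 rest ih =>
    intro fuel p out _ hfuel htexts hnxt htail hnd hhead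
    obtain ⟨p0, s0⟩ := pr0
    have hp : p = p0 := by
      simp only [List.map_cons, List.head?_cons, Option.some.injEq] at hhead
      omega
    subst hp
    cases fuel with
    | zero => simp at hfuel
    | succ fu =>
      have hget : texts.getD p "" = s0 := by
        rw [PySem.Dict.getD_eq_get?_getD, htexts (p, s0) (by simp)]
        rfl
      simp only [pvWalk, hget]
      cases rest with
      | nil =>
        have hpt : p = tail := by
          simp only [List.map_cons, List.map_nil, List.getLast?_singleton,
            Option.some.injEq] at htail
          omega
        rw [if_pos hpt]
        simp
      | cons pr1 rest' =>
        have htail' : ((pr1 :: rest').map Prod.fst).getLast? = some tail := by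
          simpa using htail
        have hmemtail : tail ∈ (pr1 :: rest').map Prod.fst :=
          List.mem_of_getLast? htail'
        simp only [List.map_cons] at hnd
        have hnd' := List.nodup_cons.mp hnd
        have hpt : ¬ p = tail := fun h => hnd'.1 (by
          have := h ▸ hmemtail
          simpa using this)
        rw [if_neg hpt]
        have hn0 := hnxt 0 (by simp)
        simp only [List.getElem_cons_zero, List.getElem_cons_succ] at hn0
        rw [hn0]
        show pvWalk texts nxt tail fu pr1.1 (out ++ [s0]) = _
        rw [ih fu pr1.1 (out ++ [s0]) (by simp) (by simp at hfuel ⊢; omega)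
          (fun pr h => htexts pr (by simp [h]))
          (fun t h => by
            have := hnxt (t + 1) (by simp at h ⊢; omega)
            simpa using this)
          htail' (by simpa using hnd'.2) (by simp)]
        simp

theorem pvInit_inv (sentences : List String) (hne : sentences ≠ []) :
    PvInv (sentences.length : Int) (PySem.List.enumerate sentences 0)
      (pvBInit (sentences.length : Int) sentences).1
      (pvBInit (sentences.length : Int) sentences).2.1
      ((sentences.length : Int) - 1)
      (pvBuild 0 (sentences.length : Int) (pvBInit (sentences.length : Int) sentences).2.2)
      (sentences.length : Int) := by
  set n : Int := (sentences.length : Int) with hn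
  have hN : 1 ≤ sentences.length := List.length_pos_of_ne_nil hne
  have hn1 : (1 : Int) ≤ n := by omega
  set E := PySem.List.enumerate sentences 0 with hEdef
  have hEmap : E = (PySem.List.pyRange 0 n 1).map (fun j => (j, PySem.List.pyGetD sentences j "")) := by
    rw [hEdef, PySem.List.enumerate_eq_map_pyRange sentences ""]
    simp only [PySem.List.len_eq, ← hn]
  have hElen : E.length = sentences.length := by
    rw [hEmap, List.length_map, PySem.List.length_pyRange_one]
    omega
  have hEfst : E.map Prod.fst = PySem.List.pyRange 0 n 1 := by
    rw [hEmap, List.map_map]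
    have hid : (Prod.fst ∘ fun j => ((j : Int), PySem.List.pyGetD sentences j "")) = id := rfl
    rw [hid, List.map_id]
  have hEsnd : E.map Prod.snd = sentences := by
    rw [hEmap, List.map_map]
    have := PySem.List.map_pyGetD_pyRange_zero sentences ""
    simp only [PySem.List.len_eq] at this
    simpa using this
  have hEget : ∀ (t : Nat) (h : t < sentences.length),
      E[t]'(by omega) = ((t : Int), PySem.List.pyGetD sentences (t : Int) "") := by
    intro t h
    rw [List.getElem_of_eq hEmap, List.getElem_map, PySem.List.getElem_pyRange_one]
    simp
  have hsplit : pvBInit n sentences =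
      (E.foldl (fun d pr => d.insert pr.1 pr.2) PySem.Dict.empty,
       E.foldl (fun d pr => if pr.1 < n - 1 then d.insert pr.1 (pr.1 + 1) else d) PySem.Dict.empty,
       E.foldl (fun v pr => v ++ [if pr.1 < n - 1 then some (PySem.Str.len pr.2, pr.1) else none]) []) := by
    unfold pvBInit
    rw [PySem.List.foldl_prod_mk (f := fun (d : PySem.Dict Int String) (pr : Int × String) => d.insert pr.1 pr.2)
      (g := fun (st2 : PySem.Dict Int Int × List (Option (Int × Int))) (pr : Int × String) =>
        ((if pr.1 < n - 1 then st2.1.insert pr.1 (pr.1 + 1) else st2.1 : PySem.Dict Int Int),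
          st2.2 ++ [if pr.1 < n - 1 then some (PySem.Str.len pr.2, pr.1) else none]))]
    rw [PySem.List.foldl_prod_mk (f := fun (d : PySem.Dict Int Int) (pr : Int × String) =>
        if pr.1 < n - 1 then d.insert pr.1 (pr.1 + 1) else d)
      (g := fun (v : List (Option (Int × Int))) (pr : Int × String) =>
        v ++ [if pr.1 < n - 1 then some (PySem.Str.len pr.2, pr.1) else none])]
  have hfstnodup : (E.map Prod.fst).Nodup := by
    rw [hEfst]; exact PySem.List.nodup_pyRange_one 0 n
  have htextsitems : (E.foldl (fun d pr => d.insert pr.1 pr.2) PySem.Dict.empty).items = E := by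
    have := PySem.Dict.items_foldl_insert_fresh E (fun a => a.1) (fun a => a.2)
      PySem.Dict.empty (fun a _ => by simp [PySem.Dict.contains_empty]) hfstnodup
    simpa using this
  have htextskeys : (E.foldl (fun d pr => d.insert pr.1 pr.2) PySem.Dict.empty).keys.Nodup := by
    show ((E.foldl (fun d pr => d.insert pr.1 pr.2) PySem.Dict.empty).items.map Prod.fst).Nodup
    rw [htextsitems]; exact hfstnodup
  have htextsget : ∀ pr ∈ E,
      (E.foldl (fun d pr => d.insert pr.1 pr.2) PySem.Dict.empty).get? pr.1 = some pr.2 := by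
    intro pr hpr
    exact PySem.Dict.get?_of_mem_items _ (by rw [htextsitems]; simpa using hpr) htextskeys
  have hfilter : E.filter (fun pr => decide (pr.1 < n - 1))
      = (PySem.List.pyRange 0 (n - 1) 1).map (fun j => (j, PySem.List.pyGetD sentences j "")) := by
    rw [hEmap, List.filter_map]
    simp only [Function.comp_def]
    have hr : (PySem.List.pyRange 0 n 1).filter
        (fun j => decide ((j, PySem.List.pyGetD sentences j "").1 < n - 1))
        = PySem.List.pyRange 0 (n - 1) 1 := by
      rw [PySem.List.pyRange_one_append 0 (n - 1) n (by omega) (by omega), List.filter_append]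
      have h1 : (PySem.List.pyRange 0 (n - 1) 1).filter
          (fun j => decide ((j, PySem.List.pyGetD sentences j "").1 < n - 1))
          = PySem.List.pyRange 0 (n - 1) 1 := by
        apply List.filter_eq_self.mpr
        intro a ha
        obtain ⟨_, h2⟩ := PySem.List.mem_pyRange_one.mp ha
        simpa using h2
      have h2 : (PySem.List.pyRange (n - 1) n 1).filter
          (fun j => decide ((j, PySem.List.pyGetD sentences j "").1 < n - 1)) = [] := by
        apply List.filter_eq_nil_iff.mpr
        intro a ha
        obtain ⟨h3, _⟩ := PySem.List.mem_pyRange_one.mp ha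
        simpa using h3
      rw [h1, h2, List.append_nil]
    rw [hr]
  have hnxtitems : (E.foldl (fun d pr => if pr.1 < n - 1 then d.insert pr.1 (pr.1 + 1) else d)
      PySem.Dict.empty).items
      = (PySem.List.pyRange 0 (n - 1) 1).map (fun j => (j, j + 1)) := by
    rw [PySem.List.foldl_ite_eq_foldl_filter (p := fun (pr : Int × String) => pr.1 < n - 1)]
    rw [hfilter]
    have := PySem.Dict.items_foldl_insert_fresh
      ((PySem.List.pyRange 0 (n - 1) 1).map (fun j => (j, PySem.List.pyGetD sentences j "")))
      (fun a => a.1) (fun a => a.1 + 1) PySem.Dict.empty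
      (fun a _ => by simp [PySem.Dict.contains_empty])
      (by
        rw [List.map_map]
        have hid : ((fun (a : Int × String) => a.1) ∘
            fun j : Int => (j, PySem.List.pyGetD sentences j "")) = id := rfl
        rw [hid, List.map_id]
        exact PySem.List.nodup_pyRange_one 0 (n - 1))
    rw [this, List.map_map]
    have hid : ((fun (a : Int × String) => ((fun a => a.1) a, (fun a => a.1 + 1) a)) ∘
        fun j : Int => (j, PySem.List.pyGetD sentences j "")) = fun j : Int => (j, j + 1) := rfl
    rw [hid]
    show ([] : List (Int × Int)) ++ _ = _
    rw [List.nil_append]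
  have hnxtkeys : (E.foldl (fun d pr => if pr.1 < n - 1 then d.insert pr.1 (pr.1 + 1) else d)
      PySem.Dict.empty).keys.Nodup := by
    show ((E.foldl _ PySem.Dict.empty).items.map Prod.fst).Nodup
    rw [hnxtitems, List.map_map]
    have hid : (Prod.fst ∘ fun j : Int => (j, j + 1)) = id := rfl
    rw [hid, List.map_id]
    exact PySem.List.nodup_pyRange_one 0 (n - 1)
  have hvals : (E.foldl (fun v pr =>
      v ++ [if pr.1 < n - 1 then some (PySem.Str.len pr.2, pr.1) else none]) [])
      = E.map (fun pr => if pr.1 < n - 1 then some (PySem.Str.len pr.2, pr.1) else none) := by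
    rw [PySem.List.foldl_append_singleton_eq_map]
    rfl
  rw [hsplit]
  refine ⟨?_, ?_, ?_, ?_, ?_, ?_, ?_, ?_, ?_, ?_⟩
  · intro h
    have := hElen
    rw [h] at this
    simp at this
    omega
  · rw [hEfst]; exact PySem.List.pairwise_lt_pyRange_one 0 n
  · intro pr hpr
    rw [hEmap] at hpr
    obtain ⟨j, hj, rfl⟩ := List.mem_map.mp hpr
    obtain ⟨h1, h2⟩ := PySem.List.mem_pyRange_one.mp hj
    exact ⟨h1, h2⟩
  · rw [hEfst, PySem.List.pyRange_one_cons (by omega : (0:Int) < n)]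
    rfl
  · rw [hElen]; omega
  · exact htextsget
  · intro t h
    have ht1 : t < sentences.length := by omega
    have ht2 : t + 1 < sentences.length := by rw [← hElen]; omega
    rw [hEget t ht1, hEget (t + 1) ht2]
    apply PySem.Dict.get?_of_mem_items _ _ hnxtkeys
    rw [hnxtitems]
    apply List.mem_map.mpr
    refine ⟨(t : Int), PySem.List.mem_pyRange_one.mpr ⟨by omega, by omega⟩, by push_cast; ring_nf⟩
  · rw [hEfst]
    have : PySem.List.pyRange 0 n 1 = PySem.List.pyRange 0 (n - 1) 1 ++ [n - 1] := by
      rw [PySem.List.pyRange_one_append 0 (n - 1) n (by omega) (by omega)]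
      congr 1
      rw [PySem.List.pyRange_one_cons (by omega : n - 1 < n)]
      have h49 : n - 1 + 1 = n := by ring
      rw [h49, PySem.List.pyRange_one_eq_nil (le_refl n)]
    rw [this, List.getLast?_concat]
  · rw [hElen]
  · rw [hvals]
    have hrep := pvBuild_spec (E.map (fun pr =>
        if pr.1 < n - 1 then some (PySem.Str.len pr.2, pr.1) else none))
      (n - 0).toNat 0 n (le_refl _) (by omega)
    apply pvRep_congr _ 0 n hrep
    intro p hp1 hp2
    have hpt : p.toNat < sentences.length := by omega
    have hmaplen : (E.map (fun pr =>
        if pr.1 < n - 1 then some (PySem.Str.len pr.2, pr.1) else none)).length = sentences.length := by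
      rw [List.length_map, hElen]
    rw [PySem.List.pyGetD_eq_getElem _ _ hp1 (by rw [hmaplen]; omega)]
    rw [List.getElem_map]
    rw [hEget p.toNat hpt]
    have hcast : ((p.toNat : Int)) = p := Int.toNat_of_nonneg hp1
    unfold pvF
    have hlook : pvLookup E p = some (PySem.List.pyGetD sentences p "") := by
      apply pvLookup_of_mem E p _ hfstnodup
      have : E[p.toNat]'(by omega) ∈ E := List.getElem_mem _
      rw [hEget p.toNat hpt, hcast] at this
      exact this
    rw [hlook]
    simp only [hcast]
    by_cases hplt : p < n - 1
    · rw [if_pos hplt, if_neg (by omega)]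
      rfl
    · rw [if_neg hplt, if_pos (by omega)]
-- ===== VERDICT (by name: the statement is the Claim_ definition above) =====
theorem pvEnum_snd (sentences : List String) :
    (PySem.List.enumerate sentences 0).map Prod.snd = sentences := by
  rw [PySem.List.enumerate_eq_map_pyRange sentences "", List.map_map]
  have := PySem.List.map_pyGetD_pyRange_zero sentences ""
  simpa using this

theorem force_merge_to_count_py_spec : Claim_equal_force_merge_to_count_py := by
  intro sentences target _ hpre
  unfold Spec_force_merge_to_count_py force_merge_to_count_py force_merge_to_count_py_alt
  by_cases hle : PySem.List.len sentences ≤ target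
  · rw [if_pos hle, if_pos hle]
  · rw [if_neg hle, if_neg hle]
    have hle' : ¬ ((sentences.length : Int) ≤ target) := by
      simpa [PySem.List.len_eq] using hle
    have htarget : 1 ≤ target := by
      rcases hpre with h | h
      · exact h
      · exact absurd h hle'
    have hne : sentences ≠ [] := by
      intro h
      rw [h] at hle'
      simp at hle'
      omega
    rw [pvALoop_eq_abs sentences.length sentences target hpre]
    simp only [PySem.List.len_eq]
    have hinit := pvInit_inv sentences hne
    obtain ⟨L', hinv', habs⟩ := pvBLoop_sim target (sentences.length : Int) htarget
      sentences.length (PySem.List.enumerate sentences 0) _ _ _ _ _ hinit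
    rw [pvWalk_spec _ _ _ L' sentences.length 0 [] hinv'.hne
      (by have := hinv'.hlen; omega) hinv'.htexts hinv'.hnxt hinv'.htail
      (hinv'.hps.imp (fun h => ne_of_lt h)) hinv'.hhead]
    rw [habs, pvEnum_snd]
    rw [List.nil_append]
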